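-- pv_equiv track=rewrite | github.com/paulklemstine/factor | lean/books/TRIANGLESWALLOWEDUNIVERSE2/source/build_book.py | illustration_block_complete
-- ===== SOURCE A (Python) =====
-- def illustration_block_complete(text):
--     start = text.find('[ILLUSTRATION')
--     if start < 0:
--         return False
--     in_math = False
--     depth = 0
--     for j in range(start, len(text)):
--         c = text[j]
--         if c == '$':
--             in_math = not in_math
--         elif not in_math:
--             if c == '[':
--                 depth += 1
--             elif c == ']':
--                 depth -= 1
--                 if depth == 0:
--                     return True
--     return False
-- ===== SOURCE B (Python) =====
-- def illustration_block_complete(text):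
--     start = text.find('[ILLUSTRATION')
--     if start < 0:
--         return False
--     depth = 0
--     for i, seg in enumerate(text[start:].split('$')):
--         if i % 2 == 1:
--             continue
--         for c in seg:
--             if c == '[':
--                 depth += 1
--             elif c == ']':
--                 depth -= 1
--                 if depth == 0:
--                     return True
--     return False
-- ===== Notes on version B (the rewrite author's own statement) =====
-- stated objective: alternative
-- what changed: B computes the tail via find once, splits it on the math delimiter and scans only the even (non-math) segments with a per-segment depth scan, replacing A's single per-character loop with an in_math toggle.
import Mathlib
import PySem

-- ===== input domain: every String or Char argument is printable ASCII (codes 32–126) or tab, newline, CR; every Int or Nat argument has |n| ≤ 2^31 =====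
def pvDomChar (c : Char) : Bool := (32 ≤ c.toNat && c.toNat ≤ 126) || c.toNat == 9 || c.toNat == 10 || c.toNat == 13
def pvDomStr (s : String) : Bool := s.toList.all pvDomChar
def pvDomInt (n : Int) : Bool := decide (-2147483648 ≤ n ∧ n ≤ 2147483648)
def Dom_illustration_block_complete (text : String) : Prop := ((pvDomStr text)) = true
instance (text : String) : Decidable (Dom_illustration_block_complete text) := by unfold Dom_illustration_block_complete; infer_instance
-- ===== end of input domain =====

-- B replaces A's per-character in_math toggle by splitting the tail on the math delimiter and scanning only the
-- even (non-math) segments; an alternative decomposition of the same linear scan, not faster.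

-- ===== PORT A =====
-- A's for-loop from `start` with state (in_math, depth) and early return
def pvGoA : List Char → Bool → Int → Bool
  | [], _, _ => false
  | c :: rest, in_math, depth =>
    if c = '$' then pvGoA rest (!in_math) depth
    else if !in_math then
      if c = '[' then pvGoA rest in_math (depth + 1)
      else if c = ']' then
        (if depth - 1 = 0 then true else pvGoA rest in_math (depth - 1))
      else pvGoA rest in_math depth
    else pvGoA rest in_math depth

def illustration_block_complete (text : String) : Bool :=
  let start := PySem.Str.find text "[ILLUSTRATION"
  if start < 0 then false
  else pvGoA (text.toList.drop start.toNat) false 0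

-- ===== PORT B =====
-- B's inner per-segment scan: none = returned True, some d = segment finished with depth d
def pvScanSeg : List Char → Int → Option Int
  | [], depth => some depth
  | c :: rest, depth =>
    if c = '[' then pvScanSeg rest (depth + 1)
    else if c = ']' then
      (if depth - 1 = 0 then none else pvScanSeg rest (depth - 1))
    else pvScanSeg rest depth

-- B's outer loop over the enumerated segments, skipping odd (math) indices
def pvGoB : List (List Char) → Nat → Int → Bool
  | [], _, _ => false
  | seg :: rest, i, depth =>
    if i % 2 = 1 then pvGoB rest (i + 1) depth
    else match pvScanSeg seg depth with
      | none => true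
      | some d => pvGoB rest (i + 1) d

def illustration_block_complete_alt (text : String) : Bool :=
  let start := PySem.Str.find text "[ILLUSTRATION"
  if start < 0 then false
  else pvGoB (PySem.Chars.splitOn (PySem.List.slice text.toList (some start) none) ['$']) 0 0

-- ===== PRECONDITION & SPEC =====
def Spec_illustration_block_complete (text : String) (out : Bool) : Prop := out = illustration_block_complete_alt text
instance (text : String) (out : Bool) : Decidable (Spec_illustration_block_complete text out) := by unfold Spec_illustration_block_complete; infer_instance

-- ===== CLAIM (what is proved, stated in full; the proofs are below) =====
def Claim_equal_illustration_block_complete : Prop := ∀ (text : String), Dom_illustration_block_complete text → Spec_illustration_block_complete text (illustration_block_complete text)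

-- ===== LEMMAS AND PROOFS =====

-- structural one-char-at-a-time characterisation of split on '$'
def pvSplitD : List Char → List (List Char)
  | [] => [[]]
  | c :: t => if c = '$' then [] :: pvSplitD t else (pvSplitD t).modifyHead (c :: ·)

lemma pvSplitD_ne_nil (l : List Char) : pvSplitD l ≠ [] := by
  cases l with
  | nil => simp [pvSplitD]
  | cons c t =>
    simp only [pvSplitD]
    split
    · simp
    · cases h : pvSplitD t with
      | nil => exact absurd h (pvSplitD_ne_nil t)
      | cons s rest => simp

lemma pvGo_eq (fuel : Nat) : ∀ (l cur : List Char) (acc : List (List Char)), l.length ≤ fuel →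
    PySem.Chars.splitOn.go ['$'] fuel l cur acc
      = acc.reverse ++ (pvSplitD l).modifyHead (cur.reverse ++ ·) := by
  induction fuel with
  | zero =>
    intro l cur acc h
    have : l = [] := List.length_eq_zero_iff.mp (Nat.le_zero.mp h)
    subst this
    simp [PySem.Chars.splitOn.go, pvSplitD]
  | succ fuel ih =>
    intro l cur acc h
    cases l with
    | nil => simp [PySem.Chars.splitOn.go, pvSplitD]
    | cons c rest =>
      by_cases hc : c = '$'
      · subst hc
        have hp : List.isPrefixOf ['$'] ('$' :: rest) = true := by simp [List.isPrefixOf]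
        simp only [PySem.Chars.splitOn.go, hp, if_pos, List.length_cons, List.drop_succ_cons,
          List.length_nil, List.drop_zero]
        rw [ih rest [] _ (by simpa using Nat.lt_succ_iff.mp (by simpa using h))]
        simp only [pvSplitD, List.reverse_nil, List.nil_append, List.reverse_cons,
          List.append_assoc, List.singleton_append]
        cases pvSplitD rest <;> simp
      · have hp : List.isPrefixOf ['$'] (c :: rest) = false := by
          simp [List.isPrefixOf]; exact fun h' => hc h'.symm
        simp only [PySem.Chars.splitOn.go, hp]
        rw [ih rest (c :: cur) acc (by simpa using Nat.lt_succ_iff.mp (by simpa using h))]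
        simp only [pvSplitD, if_neg hc]
        cases hsp : pvSplitD rest with
        | nil => exact absurd hsp (pvSplitD_ne_nil rest)
        | cons s rs => simp

lemma pvSplitOn_eq (l : List Char) : PySem.Chars.splitOn l ['$'] = pvSplitD l := by
  unfold PySem.Chars.splitOn
  rw [pvGo_eq _ l [] [] (by omega)]
  cases h : pvSplitD l with
  | nil => exact absurd h (pvSplitD_ne_nil l)
  | cons s rs => simp

lemma pvGoB_odd_cons (seg : List Char) (rest : List (List Char)) (i : Nat) (d : Int)
    (hi : i % 2 = 1) : pvGoB (seg :: rest) i d = pvGoB rest (i + 1) d := by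
  simp [pvGoB, hi]

lemma pvGoA_eq_pvGoB (l : List Char) : ∀ (i : Nat) (d : Int),
    pvGoA l (decide (i % 2 = 1)) d = pvGoB (pvSplitD l) i d := by
  induction l with
  | nil =>
    intro i d
    by_cases hi : i % 2 = 1 <;> simp [pvGoA, pvGoB, pvSplitD, pvScanSeg, hi]
  | cons c t ih =>
    intro i d
    by_cases hc : c = '$'
    · subst hc
      have hpar : (!decide (i % 2 = 1)) = decide ((i + 1) % 2 = 1) := by
        by_cases hi : i % 2 = 1 <;> simp [hi] <;> omega
      have hrhs : pvGoB (pvSplitD ('$' :: t)) i d = pvGoB (pvSplitD t) (i + 1) d := by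
        by_cases hi : i % 2 = 1 <;> simp [pvSplitD, pvGoB, pvScanSeg, hi]
      rw [hrhs]
      have := ih (i + 1) d
      calc pvGoA ('$' :: t) (decide (i % 2 = 1)) d
          = pvGoA t (!decide (i % 2 = 1)) d := by simp [pvGoA]
        _ = pvGoA t (decide ((i + 1) % 2 = 1)) d := by rw [hpar]
        _ = pvGoB (pvSplitD t) (i + 1) d := ih (i + 1) d
    · obtain ⟨s, rs, hsr⟩ : ∃ s rs, pvSplitD t = s :: rs := by
        cases h : pvSplitD t with
        | nil => exact absurd h (pvSplitD_ne_nil t)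
        | cons s rs => exact ⟨s, rs, rfl⟩
      have hsplit : pvSplitD (c :: t) = (c :: s) :: rs := by
        simp [pvSplitD, if_neg hc, hsr]
      rw [hsplit]
      by_cases hi : i % 2 = 1
      · -- odd: A skips the char, B skips the whole segment
        rw [pvGoB_odd_cons _ _ _ _ hi]
        have := ih i d
        rw [hsr, pvGoB_odd_cons _ _ _ _ hi] at this
        simpa [pvGoA, hc, hi] using this
      · -- even: both sides branch identically on c
        have hA : pvGoA (c :: t) (decide (i % 2 = 1)) d =
            if c = '[' then pvGoA t (decide (i % 2 = 1)) (d + 1)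
            else if c = ']' then (if d - 1 = 0 then true else pvGoA t (decide (i % 2 = 1)) (d - 1))
            else pvGoA t (decide (i % 2 = 1)) d := by
          simp [pvGoA, hc, hi]
        have hB : pvGoB ((c :: s) :: rs) i d =
            if c = '[' then pvGoB (s :: rs) i (d + 1)
            else if c = ']' then (if d - 1 = 0 then true else pvGoB (s :: rs) i (d - 1))
            else pvGoB (s :: rs) i d := by
          simp only [pvGoB, if_neg hi, pvScanSeg]
          split_ifs <;> simp
        rw [hA, hB, ← hsr]
        split_ifs <;> first | rfl | exact ih i _

-- ===== VERDICT (by name: the statement is the Claim_ definition above) =====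
theorem illustration_block_complete_spec : Claim_equal_illustration_block_complete := by
  intro text _
  show illustration_block_complete text = illustration_block_complete_alt text
  simp only [illustration_block_complete, illustration_block_complete_alt]
  by_cases h : PySem.Str.find text "[ILLUSTRATION" < 0
  · rw [if_pos h, if_pos h]
  · have h0 : 0 ≤ PySem.Str.find text "[ILLUSTRATION" := by omega
    rw [if_neg h, if_neg h, PySem.List.slice_from _ h0, pvSplitOn_eq]
    simpa using pvGoA_eq_pvGoB (text.toList.drop (PySem.Str.find text "[ILLUSTRATION").toNat) 0 0
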